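-- pv_equiv track=rewrite | github.com/Saha-7/AlgoCraft | 7-Strings/6. LeftMost Repeating Char.py | leftMostrepeat
-- ===== SOURCE A (Python) =====
-- def leftMostrepeat(str):
--     visited={}
--     for i,ch in enumerate(str):
--         if ch in visited:
--             return visited[ch]
--         else:
--             visited[ch]=i
--     return -1
-- ===== SOURCE B (Python) =====
-- def leftMostrepeat(str):
--     first = {}
--     second = {}
--     for i, ch in enumerate(str):
--         if ch in first:
--             if ch not in second:
--                 second[ch] = i
--         else:
--             first[ch] = i
--     if not second:
--         return -1
--     best = min(second, key=second.get)
--     return first[best]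
-- ===== Notes on version B (the rewrite author's own statement) =====
-- stated objective: alternative
-- what changed: A's early-return scan with one visited dict is replaced by a full single pass building a first-occurrence table and a second-occurrence table, followed by a min over the second table's values to select the answer.
import Mathlib
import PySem

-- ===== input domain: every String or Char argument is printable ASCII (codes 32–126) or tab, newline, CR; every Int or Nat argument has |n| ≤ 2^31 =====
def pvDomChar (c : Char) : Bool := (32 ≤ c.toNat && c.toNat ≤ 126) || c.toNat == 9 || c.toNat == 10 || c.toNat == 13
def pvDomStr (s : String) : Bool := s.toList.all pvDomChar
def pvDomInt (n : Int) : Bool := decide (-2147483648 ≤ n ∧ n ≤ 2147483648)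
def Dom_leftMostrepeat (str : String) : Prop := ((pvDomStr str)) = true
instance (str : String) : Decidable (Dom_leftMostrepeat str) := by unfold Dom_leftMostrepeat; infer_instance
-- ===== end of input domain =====

-- B replaces A's early-return scan by a full pass building first/second occurrence tables
-- plus a min over the second table (objective: alternative decomposition, same O(n) cost).

-- ===== PORT A =====
def leftMostrepeatGo : List Char → PySem.Dict Char Int → Int → Int
  | [], _, _ => -1
  | ch :: rest, visited, i =>
    if visited.contains ch then visited.getD ch 0
    else leftMostrepeatGo rest (visited.insert ch i) (i + 1)

def leftMostrepeat (str : String) : Int :=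
  leftMostrepeatGo str.toList PySem.Dict.empty 0

-- ===== PORT B =====
-- loop body: first records a char's first index, second its first repeat index
def lmrStep (fs : PySem.Dict Char Int × PySem.Dict Char Int) (p : Int × Char) :
    PySem.Dict Char Int × PySem.Dict Char Int :=
  if fs.1.contains p.2 then
    if fs.2.contains p.2 then fs else (fs.1, fs.2.insert p.2 p.1)
  else (fs.1.insert p.2 p.1, fs.2)

-- after the pass: 'if not second: return -1; best = min(second, key=second.get); return first[best]'
def lmrFinish (fs : PySem.Dict Char Int × PySem.Dict Char Int) : Int :=
  match PySem.List.min? fs.2.keys (fun k => fs.2.getD k 0) with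
  | none => -1
  | some best => fs.1.getD best 0

def leftMostrepeat_alt (str : String) : Int :=
  lmrFinish ((PySem.List.enumerate str.toList 0).foldl lmrStep (PySem.Dict.empty, PySem.Dict.empty))

-- ===== PRECONDITION & SPEC =====
def Spec_leftMostrepeat (str : String) (out : Int) : Prop := out = leftMostrepeat_alt str
instance (str : String) (out : Int) : Decidable (Spec_leftMostrepeat str out) := by unfold Spec_leftMostrepeat; infer_instance

-- ===== CLAIM (what is proved, stated in full; the proofs are below) =====
def Claim_equal_leftMostrepeat : Prop := ∀ (str : String), Dom_leftMostrepeat str → Spec_leftMostrepeat str (leftMostrepeat str)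

-- ===== LEMMAS AND PROOFS =====

-- keeping a minimal accumulator through min?'s fold
lemma lmr_foldl_min_keep {α κ : Type} [LinearOrder κ] (key : α → κ) (t : List α) (m : α)
    (h : ∀ y ∈ t, ¬ key y < key m) :
    t.foldl
      (fun acc x =>
        match acc with
        | none => some x
        | some m' => if key x < key m' then some x else some m') (some m) = some m := by
  induction t with
  | nil => rfl
  | cons y t ih =>
    simp only [List.foldl_cons]
    rw [if_neg (h y (by simp))]
    exact ih (fun y hy => h y (by simp [hy]))

lemma lmr_min?_cons {α κ : Type} [LinearOrder κ] (key : α → κ) (x : α) (t : List α)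
    (h : ∀ y ∈ t, ¬ key y < key x) :
    PySem.List.min? (x :: t) key = some x := by
  simp only [PySem.List.min?, List.foldl_cons]
  exact lmr_foldl_min_keep key t x h

-- once 'second' has a head entry (k0, v0) with v0 below every later value and every future
-- index, the final min picks k0 and the answer is first[k0], which later steps preserve
lemma lmr_tail (l : List Char) : ∀ (j : Int) (first second : PySem.Dict Char Int)
    (k0 : Char) (v0 : Int) (tl : List (Char × Int)),
    second.items = (k0, v0) :: tl →
    second.keys.Nodup →
    (∀ p ∈ tl, v0 < p.2) →
    (∀ p ∈ second.items, p.2 < j) →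
    first.contains k0 = true →
    lmrFinish ((PySem.List.enumerate l j).foldl lmrStep (first, second)) = first.getD k0 0 := by
  induction l with
  | nil =>
    intro j first second k0 v0 tl hitems hnd htl _ _
    simp only [PySem.List.enumerate_nil, List.foldl_nil, lmrFinish]
    have hkeys : second.keys = k0 :: tl.map (·.1) := by
      simp [PySem.Dict.keys, hitems]
    have hv0 : second.getD k0 0 = v0 :=
      PySem.Dict.getD_of_mem_items second (by rw [hitems]; exact List.mem_cons_self) hnd 0
    have hmin : PySem.List.min? second.keys (fun k => second.getD k 0) = some k0 := by
      rw [hkeys]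
      apply lmr_min?_cons
      intro y hy
      obtain ⟨p, hp, hpy⟩ := List.mem_map.mp hy
      have : second.getD y 0 = p.2 := by
        subst hpy
        exact PySem.Dict.getD_of_mem_items second (by rw [hitems]; exact List.mem_cons_of_mem _ hp) hnd 0
      rw [this, hv0]
      exact not_lt.mpr (le_of_lt (htl p hp))
    rw [hmin]
  | cons c rest ih =>
    intro j first second k0 v0 tl hitems hnd htl hlt hk0
    rw [PySem.List.enumerate_cons, List.foldl_cons]
    by_cases hc : first.contains c = true
    · by_cases hs : second.contains c = true
      · have hstep : lmrStep (first, second) (j, c) = (first, second) := by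
          simp [lmrStep, hc, hs]
        rw [hstep]
        exact ih (j + 1) first second k0 v0 tl hitems hnd htl
          (fun p hp => lt_trans (hlt p hp) (by omega)) hk0
      · have hstep : lmrStep (first, second) (j, c) = (first, second.insert c j) := by
          simp [lmrStep, hc, hs]
        rw [hstep]
        have hs' : second.contains c = false := by simpa using hs
        have hitems' : (second.insert c j).items = (k0, v0) :: (tl ++ [(c, j)]) := by
          rw [PySem.Dict.items_insert_of_not_contains second j hs', hitems]; rfl
        have hv0j : v0 < j := hlt (k0, v0) (by rw [hitems]; exact List.mem_cons_self)
        refine ih (j + 1) first (second.insert c j) k0 v0 (tl ++ [(c, j)]) hitems'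
          (PySem.Dict.nodup_keys_insert _ _ _ hnd) ?_ ?_ hk0
        · intro p hp
          rcases List.mem_append.mp hp with h | h
          · exact htl p h
          · simp only [List.mem_singleton] at h; subst h; exact hv0j
        · intro p hp
          rw [hitems'] at hp
          rcases List.mem_cons.mp hp with h | h
          · subst h; omega
          · rcases List.mem_append.mp h with h' | h'
            · have := hlt p (by rw [hitems]; exact List.mem_cons_of_mem _ h'); omega
            · simp only [List.mem_singleton] at h'; subst h'; omega
    · have hstep : lmrStep (first, second) (j, c) = (first.insert c j, second) := by
        simp [lmrStep, hc]
      rw [hstep]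
      have hne : k0 ≠ c := by
        intro h; rw [h] at hk0; rw [hk0] at hc; exact hc rfl
      have := ih (j + 1) (first.insert c j) second k0 v0 tl hitems hnd htl
        (fun p hp => lt_trans (hlt p hp) (by omega))
        (by rw [PySem.Dict.contains_insert]; simp [hk0])
      rw [this, PySem.Dict.getD_insert_of_ne first j 0 hne]

-- while no repeat has been seen, A's visited dict equals B's first table and B's second is empty
lemma lmr_main (l : List Char) : ∀ (visited : PySem.Dict Char Int) (i : Int),
    visited.keys.Nodup →
    (∀ p ∈ visited.items, p.2 < i) →
    leftMostrepeatGo l visited i =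
      lmrFinish ((PySem.List.enumerate l i).foldl lmrStep (visited, PySem.Dict.empty)) := by
  induction l with
  | nil =>
    intro visited i _ _
    rfl
  | cons ch rest ih =>
    intro visited i hnd hlt
    rw [PySem.List.enumerate_cons, List.foldl_cons]
    by_cases hc : visited.contains ch = true
    · have hstep : lmrStep (visited, PySem.Dict.empty) (i, ch) =
          (visited, PySem.Dict.empty.insert ch i) := by
        simp [lmrStep, hc, PySem.Dict.contains_empty]
      rw [hstep]
      have hg : leftMostrepeatGo (ch :: rest) visited i = visited.getD ch 0 := by
        simp [leftMostrepeatGo, hc]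
      rw [hg]
      exact (lmr_tail rest (i + 1) visited (PySem.Dict.empty.insert ch i) ch i []
        (by rfl) (PySem.Dict.nodup_keys_insert _ _ _ PySem.Dict.nodup_keys_empty) (by simp)
        (by intro p hp; simp only [show (PySem.Dict.empty.insert ch i).items = [(ch, i)] from rfl,
              List.mem_singleton] at hp; subst hp; omega)
        hc).symm
    · have hstep : lmrStep (visited, PySem.Dict.empty) (i, ch) =
          (visited.insert ch i, PySem.Dict.empty) := by
        simp [lmrStep, hc]
      rw [hstep]
      have hg : leftMostrepeatGo (ch :: rest) visited i =
          leftMostrepeatGo rest (visited.insert ch i) (i + 1) := by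
        simp [leftMostrepeatGo, hc]
      rw [hg]
      refine ih (visited.insert ch i) (i + 1) (PySem.Dict.nodup_keys_insert _ _ _ hnd) ?_
      intro p hp
      have hc' : visited.contains ch = false := by simpa using hc
      rw [PySem.Dict.items_insert_of_not_contains visited i hc'] at hp
      rcases List.mem_append.mp hp with h | h
      · have := hlt p h; omega
      · simp only [List.mem_singleton] at h; subst h; omega

-- ===== VERDICT (by name: the statement is the Claim_ definition above) =====
theorem leftMostrepeat_spec : Claim_equal_leftMostrepeat := by
  intro str _
  show leftMostrepeat str = leftMostrepeat_alt str
  exact lmr_main str.toList PySem.Dict.empty 0 (by simp)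
    (by intro p hp; simp [show (PySem.Dict.empty : PySem.Dict Char Int).items = [] from rfl] at hp)
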